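-- pv_equiv track=rewrite | github.com/stfxecutables/df-analyze | traffic.py | rename_makes_4
-- ===== SOURCE A (Python) =====
-- def rename_makes_4(s: str) -> str:
--     # fmt: off
--     spellings = {
--         'accord': ['acco', 'accord'],
--         'alfa': ['adva', 'aga', 'alfa'],
--         'apollo': ['apol', 'apollo', 'appolo'],
--         'aston martin': ['asto martin',
--                         'aston martin',
--                         'astro martin',
--                         'austin martin'],
--         'buick': ['black', 'bruick', 'buick'],
--         'cadillac': ['cadillac', 'cadal', 'cadalic', 'cadli', 'catalac'],
--         'camry': ['caddy', 'cam', 'cama', 'camaro', 'camery', 'camry', 'car',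
--                 'carg', 'carm', 'carr', 'carry', 'catr', 'crhry', 'crry'],
--         'civic': ['cidi', 'cimc', 'citi', 'civic'],
--         'dodge': ['dodge ram', 'dodge van'],
--         'dongfang': ['dong fang', 'dongfang'],
--         'ferrari': [ 'ferr', 'ferrari'],
--         'ford': ['ford', 'fort', 'forte'],
--         'freightliner': ['freightliner' 'fhrt', 'fht', 'fhtl', 'fre', 'fret',
--                 'frf', 'frgh', 'frgt', 'frhy', 'frie', 'frli', 'frnt', 'fron',
--                 'frth', 'frtl', 'ftl' 'ftl', 'ftlr', 'ftlr'],
--         'honda': ['ond', 'onda', 'ondah'],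
--         'kawasaki': ['kaw', 'kawa', 'kawa', 'kawak', 'kawas', 'kawc', 'kawi',
--                 'kazda', 'kwak'],
--         'landrover': ['lanr', 'landr', 'landro', 'lanr', 'lanro', 'laro', 'lnd',
--                 'lnrr', 'lnrv'],
--         'mercedes': ['mercedes', 'm benz', 'm-benz', 'm/benz', 'marcz', 'mbenz',
--                 'mebe', 'mebz', 'mec', 'mece', 'merb', 'merbenz', 'merc.',
--                 'mercb', 'mercben', 'mercbz', 'mercd', 'mercdz', 'merce',
--                 'merce', 'mercez', 'mercq', 'mercs', 'mercz', 'merd', 'merdz',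
--                 'merec', 'merece', 'merez', 'merk', 'merq', 'merrz', 'mers',
--                 'mertz', 'merv', 'merx', 'merxz', 'merzb', 'merzd', 'merzds',
--                 'merze', 'merzs', 'merzz', 'merzzz', 'metz', 'mmerz', 'modz',
--                 'mrc', 'mrcb', 'mrcd', 'mrcy', 'mrez', 'mrrz', 'mrrz'],
--         'mitsubishi': ['mitsubishi', 'mitsub', 'mitsuh.'],
--         'moped': ['mobed', 'moped'],
--         'nissan': ['nissan', 'missan'],
--         'none': ['unknown'],
--         'rav4': ['rav', 'rav 4', 'rav4', 'rave'],
--         'shanghai': ['shanghai', 'shanhaie'],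
--         'sunny': ['sunl', 'sunny', 'surly'],
--         'taotao': ['taotao', 'tayotayo' 'tao', 'taoi', 'tatt', 'toay'],
--         'toyota': ['yoyota', 'yotoa', 'yotota', 'youota', 'yoyo', 'yoyota',
--                     'yoyt', 'ytoyota'],
--         'volkswagen': ['vlkwg', 'volk wag', 'volks wag', 'volkswagen',
--                 'volkval', 'volkwag', 'volkwgn', 'volwag', 'wilkswagon',
--                 'wolks wagon', 'wolkswagen', 'wolkswagon', 'wolkwagen',
--                 'wolskwagen', 'wolswagon', 'wvolkswagen'],
--         'volvo': ['vol', 'volvo'],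
--         'western star': ['western sta', 'western star', 'west'],
--         'yongfu': ['yonfu', 'yong', 'yongfu', 'youngfu'],
--         'zhejiang': ['zhe jiang', 'zhejiang'],
--         'zhejiang jiajue': ['zhejiang jiajue', 'zhej', 'zheng', 'zhil', 'zhng']
--     }
--     # fmt: on
--     for correct, misspellings in spellings.items():
--         if s in misspellings:
--             return correct
--     return s
-- ===== SOURCE B (Python) =====
-- # Canonical-make lookup written as a single flat misspelling -> canonical table
-- # (each misspelling listed once, first bucket wins), so the function is one dict probe.
-- _CANONICAL = {
--     'acco': 'accord',
--     'accord': 'accord',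
--     'adva': 'alfa',
--     'aga': 'alfa',
--     'alfa': 'alfa',
--     'apol': 'apollo',
--     'apollo': 'apollo',
--     'appolo': 'apollo',
--     'asto martin': 'aston martin',
--     'aston martin': 'aston martin',
--     'astro martin': 'aston martin',
--     'austin martin': 'aston martin',
--     'black': 'buick',
--     'bruick': 'buick',
--     'buick': 'buick',
--     'cadillac': 'cadillac',
--     'cadal': 'cadillac',
--     'cadalic': 'cadillac',
--     'cadli': 'cadillac',
--     'catalac': 'cadillac',
--     'caddy': 'camry',
--     'cam': 'camry',
--     'cama': 'camry',
--     'camaro': 'camry',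
--     'camery': 'camry',
--     'camry': 'camry',
--     'car': 'camry',
--     'carg': 'camry',
--     'carm': 'camry',
--     'carr': 'camry',
--     'carry': 'camry',
--     'catr': 'camry',
--     'crhry': 'camry',
--     'crry': 'camry',
--     'cidi': 'civic',
--     'cimc': 'civic',
--     'citi': 'civic',
--     'civic': 'civic',
--     'dodge ram': 'dodge',
--     'dodge van': 'dodge',
--     'dong fang': 'dongfang',
--     'dongfang': 'dongfang',
--     'ferr': 'ferrari',
--     'ferrari': 'ferrari',
--     'ford': 'ford',
--     'fort': 'ford',
--     'forte': 'ford',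
--     'freightlinerfhrt': 'freightliner',
--     'fht': 'freightliner',
--     'fhtl': 'freightliner',
--     'fre': 'freightliner',
--     'fret': 'freightliner',
--     'frf': 'freightliner',
--     'frgh': 'freightliner',
--     'frgt': 'freightliner',
--     'frhy': 'freightliner',
--     'frie': 'freightliner',
--     'frli': 'freightliner',
--     'frnt': 'freightliner',
--     'fron': 'freightliner',
--     'frth': 'freightliner',
--     'frtl': 'freightliner',
--     'ftlftl': 'freightliner',
--     'ftlr': 'freightliner',
--     'ond': 'honda',
--     'onda': 'honda',
--     'ondah': 'honda',
--     'kaw': 'kawasaki',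
--     'kawa': 'kawasaki',
--     'kawak': 'kawasaki',
--     'kawas': 'kawasaki',
--     'kawc': 'kawasaki',
--     'kawi': 'kawasaki',
--     'kazda': 'kawasaki',
--     'kwak': 'kawasaki',
--     'lanr': 'landrover',
--     'landr': 'landrover',
--     'landro': 'landrover',
--     'lanro': 'landrover',
--     'laro': 'landrover',
--     'lnd': 'landrover',
--     'lnrr': 'landrover',
--     'lnrv': 'landrover',
--     'mercedes': 'mercedes',
--     'm benz': 'mercedes',
--     'm-benz': 'mercedes',
--     'm/benz': 'mercedes',
--     'marcz': 'mercedes',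
--     'mbenz': 'mercedes',
--     'mebe': 'mercedes',
--     'mebz': 'mercedes',
--     'mec': 'mercedes',
--     'mece': 'mercedes',
--     'merb': 'mercedes',
--     'merbenz': 'mercedes',
--     'merc.': 'mercedes',
--     'mercb': 'mercedes',
--     'mercben': 'mercedes',
--     'mercbz': 'mercedes',
--     'mercd': 'mercedes',
--     'mercdz': 'mercedes',
--     'merce': 'mercedes',
--     'mercez': 'mercedes',
--     'mercq': 'mercedes',
--     'mercs': 'mercedes',
--     'mercz': 'mercedes',
--     'merd': 'mercedes',
--     'merdz': 'mercedes',
--     'merec': 'mercedes',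
--     'merece': 'mercedes',
--     'merez': 'mercedes',
--     'merk': 'mercedes',
--     'merq': 'mercedes',
--     'merrz': 'mercedes',
--     'mers': 'mercedes',
--     'mertz': 'mercedes',
--     'merv': 'mercedes',
--     'merx': 'mercedes',
--     'merxz': 'mercedes',
--     'merzb': 'mercedes',
--     'merzd': 'mercedes',
--     'merzds': 'mercedes',
--     'merze': 'mercedes',
--     'merzs': 'mercedes',
--     'merzz': 'mercedes',
--     'merzzz': 'mercedes',
--     'metz': 'mercedes',
--     'mmerz': 'mercedes',
--     'modz': 'mercedes',
--     'mrc': 'mercedes',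
--     'mrcb': 'mercedes',
--     'mrcd': 'mercedes',
--     'mrcy': 'mercedes',
--     'mrez': 'mercedes',
--     'mrrz': 'mercedes',
--     'mitsubishi': 'mitsubishi',
--     'mitsub': 'mitsubishi',
--     'mitsuh.': 'mitsubishi',
--     'mobed': 'moped',
--     'moped': 'moped',
--     'nissan': 'nissan',
--     'missan': 'nissan',
--     'unknown': 'none',
--     'rav': 'rav4',
--     'rav 4': 'rav4',
--     'rav4': 'rav4',
--     'rave': 'rav4',
--     'shanghai': 'shanghai',
--     'shanhaie': 'shanghai',
--     'sunl': 'sunny',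
--     'sunny': 'sunny',
--     'surly': 'sunny',
--     'taotao': 'taotao',
--     'tayotayotao': 'taotao',
--     'taoi': 'taotao',
--     'tatt': 'taotao',
--     'toay': 'taotao',
--     'yoyota': 'toyota',
--     'yotoa': 'toyota',
--     'yotota': 'toyota',
--     'youota': 'toyota',
--     'yoyo': 'toyota',
--     'yoyt': 'toyota',
--     'ytoyota': 'toyota',
--     'vlkwg': 'volkswagen',
--     'volk wag': 'volkswagen',
--     'volks wag': 'volkswagen',
--     'volkswagen': 'volkswagen',
--     'volkval': 'volkswagen',
--     'volkwag': 'volkswagen',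
--     'volkwgn': 'volkswagen',
--     'volwag': 'volkswagen',
--     'wilkswagon': 'volkswagen',
--     'wolks wagon': 'volkswagen',
--     'wolkswagen': 'volkswagen',
--     'wolkswagon': 'volkswagen',
--     'wolkwagen': 'volkswagen',
--     'wolskwagen': 'volkswagen',
--     'wolswagon': 'volkswagen',
--     'wvolkswagen': 'volkswagen',
--     'vol': 'volvo',
--     'volvo': 'volvo',
--     'western sta': 'western star',
--     'western star': 'western star',
--     'west': 'western star',
--     'yonfu': 'yongfu',
--     'yong': 'yongfu',
--     'yongfu': 'yongfu',
--     'youngfu': 'yongfu',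
--     'zhe jiang': 'zhejiang',
--     'zhejiang': 'zhejiang',
--     'zhejiang jiajue': 'zhejiang jiajue',
--     'zhej': 'zhejiang jiajue',
--     'zheng': 'zhejiang jiajue',
--     'zhil': 'zhejiang jiajue',
--     'zhng': 'zhejiang jiajue',
-- }
--
--
-- def rename_makes_4(s: str) -> str:
--     return _CANONICAL.get(s, s)
-- ===== Notes on version B (the rewrite author's own statement) =====
-- stated objective: faster
-- what changed: Replaces the per-call scan over 32 bucket lists (a list-membership test per bucket) with a single flat misspelling->canonical dict (each misspelling listed once, first bucket wins) probed once per call with .get(s, s).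
import Mathlib
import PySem

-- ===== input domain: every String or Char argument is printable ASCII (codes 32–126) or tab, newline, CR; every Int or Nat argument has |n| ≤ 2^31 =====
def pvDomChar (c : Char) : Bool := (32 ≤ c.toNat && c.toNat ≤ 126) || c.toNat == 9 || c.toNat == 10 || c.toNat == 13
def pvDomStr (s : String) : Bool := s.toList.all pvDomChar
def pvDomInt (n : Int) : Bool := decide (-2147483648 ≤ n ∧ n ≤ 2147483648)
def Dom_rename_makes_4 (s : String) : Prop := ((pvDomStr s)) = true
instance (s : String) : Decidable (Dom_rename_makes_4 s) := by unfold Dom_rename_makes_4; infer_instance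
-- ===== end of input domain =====

-- B replaces A's per-call scan over the 32 bucket lists with a single flat misspelling -> canonical
-- table (each misspelling listed once, first bucket wins) probed once per call; objective: faster (constant-factor).

-- ===== PORT A =====
-- the spellings dict literal of A (after Python's implicit string concatenations), in insertion order
def pvSpellings : List (String × List String) :=
[
  ("accord", ["acco", "accord"]),
  ("alfa", ["adva", "aga", "alfa"]),
  ("apollo", ["apol", "apollo", "appolo"]),
  ("aston martin", ["asto martin", "aston martin", "astro martin", "austin martin"]),
  ("buick", ["black", "bruick", "buick"]),
  ("cadillac", ["cadillac", "cadal", "cadalic", "cadli", "catalac"]),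
  ("camry", ["caddy", "cam", "cama", "camaro", "camery", "camry", "car", "carg", "carm", "carr", "carry", "catr", "crhry", "crry"]),
  ("civic", ["cidi", "cimc", "citi", "civic"]),
  ("dodge", ["dodge ram", "dodge van"]),
  ("dongfang", ["dong fang", "dongfang"]),
  ("ferrari", ["ferr", "ferrari"]),
  ("ford", ["ford", "fort", "forte"]),
  ("freightliner", ["freightlinerfhrt", "fht", "fhtl", "fre", "fret", "frf", "frgh", "frgt", "frhy", "frie", "frli", "frnt", "fron", "frth", "frtl", "ftlftl", "ftlr", "ftlr"]),
  ("honda", ["ond", "onda", "ondah"]),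
  ("kawasaki", ["kaw", "kawa", "kawa", "kawak", "kawas", "kawc", "kawi", "kazda", "kwak"]),
  ("landrover", ["lanr", "landr", "landro", "lanr", "lanro", "laro", "lnd", "lnrr", "lnrv"]),
  ("mercedes", ["mercedes", "m benz", "m-benz", "m/benz", "marcz", "mbenz", "mebe", "mebz", "mec", "mece", "merb", "merbenz", "merc.", "mercb", "mercben", "mercbz", "mercd", "mercdz", "merce", "merce", "mercez", "mercq", "mercs", "mercz", "merd", "merdz", "merec", "merece", "merez", "merk", "merq", "merrz", "mers", "mertz", "merv", "merx", "merxz", "merzb", "merzd", "merzds", "merze", "merzs", "merzz", "merzzz", "metz", "mmerz", "modz", "mrc", "mrcb", "mrcd", "mrcy", "mrez", "mrrz", "mrrz"]),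
  ("mitsubishi", ["mitsubishi", "mitsub", "mitsuh."]),
  ("moped", ["mobed", "moped"]),
  ("nissan", ["nissan", "missan"]),
  ("none", ["unknown"]),
  ("rav4", ["rav", "rav 4", "rav4", "rave"]),
  ("shanghai", ["shanghai", "shanhaie"]),
  ("sunny", ["sunl", "sunny", "surly"]),
  ("taotao", ["taotao", "tayotayotao", "taoi", "tatt", "toay"]),
  ("toyota", ["yoyota", "yotoa", "yotota", "youota", "yoyo", "yoyota", "yoyt", "ytoyota"]),
  ("volkswagen", ["vlkwg", "volk wag", "volks wag", "volkswagen", "volkval", "volkwag", "volkwgn", "volwag", "wilkswagon", "wolks wagon", "wolkswagen", "wolkswagon", "wolkwagen", "wolskwagen", "wolswagon", "wvolkswagen"]),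
  ("volvo", ["vol", "volvo"]),
  ("western star", ["western sta", "western star", "west"]),
  ("yongfu", ["yonfu", "yong", "yongfu", "youngfu"]),
  ("zhejiang", ["zhe jiang", "zhejiang"]),
  ("zhejiang jiajue", ["zhejiang jiajue", "zhej", "zheng", "zhil", "zhng"])
]

-- A's for-loop over spellings.items() with its early return ('if s in misspellings: return correct')
def pvScanA (s : String) : List (String × List String) → String
  | [] => s
  | (c, ms) :: rest => if ms.contains s then c else pvScanA s rest

def rename_makes_4 (s : String) : String := pvScanA s pvSpellings

-- ===== PORT B =====
-- Source B's flat dict literal _CANONICAL (no duplicate keys), as an association list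
def pvCanonical : List (String × String) :=
[
  ("acco", "accord"),
  ("accord", "accord"),
  ("adva", "alfa"),
  ("aga", "alfa"),
  ("alfa", "alfa"),
  ("apol", "apollo"),
  ("apollo", "apollo"),
  ("appolo", "apollo"),
  ("asto martin", "aston martin"),
  ("aston martin", "aston martin"),
  ("astro martin", "aston martin"),
  ("austin martin", "aston martin"),
  ("black", "buick"),
  ("bruick", "buick"),
  ("buick", "buick"),
  ("cadillac", "cadillac"),
  ("cadal", "cadillac"),
  ("cadalic", "cadillac"),
  ("cadli", "cadillac"),
  ("catalac", "cadillac"),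
  ("caddy", "camry"),
  ("cam", "camry"),
  ("cama", "camry"),
  ("camaro", "camry"),
  ("camery", "camry"),
  ("camry", "camry"),
  ("car", "camry"),
  ("carg", "camry"),
  ("carm", "camry"),
  ("carr", "camry"),
  ("carry", "camry"),
  ("catr", "camry"),
  ("crhry", "camry"),
  ("crry", "camry"),
  ("cidi", "civic"),
  ("cimc", "civic"),
  ("citi", "civic"),
  ("civic", "civic"),
  ("dodge ram", "dodge"),
  ("dodge van", "dodge"),
  ("dong fang", "dongfang"),
  ("dongfang", "dongfang"),
  ("ferr", "ferrari"),
  ("ferrari", "ferrari"),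
  ("ford", "ford"),
  ("fort", "ford"),
  ("forte", "ford"),
  ("freightlinerfhrt", "freightliner"),
  ("fht", "freightliner"),
  ("fhtl", "freightliner"),
  ("fre", "freightliner"),
  ("fret", "freightliner"),
  ("frf", "freightliner"),
  ("frgh", "freightliner"),
  ("frgt", "freightliner"),
  ("frhy", "freightliner"),
  ("frie", "freightliner"),
  ("frli", "freightliner"),
  ("frnt", "freightliner"),
  ("fron", "freightliner"),
  ("frth", "freightliner"),
  ("frtl", "freightliner"),
  ("ftlftl", "freightliner"),
  ("ftlr", "freightliner"),
  ("ond", "honda"),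
  ("onda", "honda"),
  ("ondah", "honda"),
  ("kaw", "kawasaki"),
  ("kawa", "kawasaki"),
  ("kawak", "kawasaki"),
  ("kawas", "kawasaki"),
  ("kawc", "kawasaki"),
  ("kawi", "kawasaki"),
  ("kazda", "kawasaki"),
  ("kwak", "kawasaki"),
  ("lanr", "landrover"),
  ("landr", "landrover"),
  ("landro", "landrover"),
  ("lanro", "landrover"),
  ("laro", "landrover"),
  ("lnd", "landrover"),
  ("lnrr", "landrover"),
  ("lnrv", "landrover"),
  ("mercedes", "mercedes"),
  ("m benz", "mercedes"),
  ("m-benz", "mercedes"),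
  ("m/benz", "mercedes"),
  ("marcz", "mercedes"),
  ("mbenz", "mercedes"),
  ("mebe", "mercedes"),
  ("mebz", "mercedes"),
  ("mec", "mercedes"),
  ("mece", "mercedes"),
  ("merb", "mercedes"),
  ("merbenz", "mercedes"),
  ("merc.", "mercedes"),
  ("mercb", "mercedes"),
  ("mercben", "mercedes"),
  ("mercbz", "mercedes"),
  ("mercd", "mercedes"),
  ("mercdz", "mercedes"),
  ("merce", "mercedes"),
  ("mercez", "mercedes"),
  ("mercq", "mercedes"),
  ("mercs", "mercedes"),
  ("mercz", "mercedes"),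
  ("merd", "mercedes"),
  ("merdz", "mercedes"),
  ("merec", "mercedes"),
  ("merece", "mercedes"),
  ("merez", "mercedes"),
  ("merk", "mercedes"),
  ("merq", "mercedes"),
  ("merrz", "mercedes"),
  ("mers", "mercedes"),
  ("mertz", "mercedes"),
  ("merv", "mercedes"),
  ("merx", "mercedes"),
  ("merxz", "mercedes"),
  ("merzb", "mercedes"),
  ("merzd", "mercedes"),
  ("merzds", "mercedes"),
  ("merze", "mercedes"),
  ("merzs", "mercedes"),
  ("merzz", "mercedes"),
  ("merzzz", "mercedes"),
  ("metz", "mercedes"),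
  ("mmerz", "mercedes"),
  ("modz", "mercedes"),
  ("mrc", "mercedes"),
  ("mrcb", "mercedes"),
  ("mrcd", "mercedes"),
  ("mrcy", "mercedes"),
  ("mrez", "mercedes"),
  ("mrrz", "mercedes"),
  ("mitsubishi", "mitsubishi"),
  ("mitsub", "mitsubishi"),
  ("mitsuh.", "mitsubishi"),
  ("mobed", "moped"),
  ("moped", "moped"),
  ("nissan", "nissan"),
  ("missan", "nissan"),
  ("unknown", "none"),
  ("rav", "rav4"),
  ("rav 4", "rav4"),
  ("rav4", "rav4"),
  ("rave", "rav4"),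
  ("shanghai", "shanghai"),
  ("shanhaie", "shanghai"),
  ("sunl", "sunny"),
  ("sunny", "sunny"),
  ("surly", "sunny"),
  ("taotao", "taotao"),
  ("tayotayotao", "taotao"),
  ("taoi", "taotao"),
  ("tatt", "taotao"),
  ("toay", "taotao"),
  ("yoyota", "toyota"),
  ("yotoa", "toyota"),
  ("yotota", "toyota"),
  ("youota", "toyota"),
  ("yoyo", "toyota"),
  ("yoyt", "toyota"),
  ("ytoyota", "toyota"),
  ("vlkwg", "volkswagen"),
  ("volk wag", "volkswagen"),
  ("volks wag", "volkswagen"),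
  ("volkswagen", "volkswagen"),
  ("volkval", "volkswagen"),
  ("volkwag", "volkswagen"),
  ("volkwgn", "volkswagen"),
  ("volwag", "volkswagen"),
  ("wilkswagon", "volkswagen"),
  ("wolks wagon", "volkswagen"),
  ("wolkswagen", "volkswagen"),
  ("wolkswagon", "volkswagen"),
  ("wolkwagen", "volkswagen"),
  ("wolskwagen", "volkswagen"),
  ("wolswagon", "volkswagen"),
  ("wvolkswagen", "volkswagen"),
  ("vol", "volvo"),
  ("volvo", "volvo"),
  ("western sta", "western star"),
  ("western star", "western star"),
  ("west", "western star"),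
  ("yonfu", "yongfu"),
  ("yong", "yongfu"),
  ("yongfu", "yongfu"),
  ("youngfu", "yongfu"),
  ("zhe jiang", "zhejiang"),
  ("zhejiang", "zhejiang"),
  ("zhejiang jiajue", "zhejiang jiajue"),
  ("zhej", "zhejiang jiajue"),
  ("zheng", "zhejiang jiajue"),
  ("zhil", "zhejiang jiajue"),
  ("zhng", "zhejiang jiajue")
]

-- Source B's body: _CANONICAL.get(s, s)  (dict lookup = first match in the association list)
def rename_makes_4_alt (s : String) : String :=
  match pvCanonical.find? (fun p => p.1 == s) with
  | some p => p.2
  | none => s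

-- ===== PRECONDITION & SPEC =====
def Spec_rename_makes_4 (s : String) (out : String) : Prop := out = rename_makes_4_alt s
instance (s : String) (out : String) : Decidable (Spec_rename_makes_4 s out) := by unfold Spec_rename_makes_4; infer_instance

-- ===== CLAIM (what is proved, stated in full; the proofs are below) =====
def Claim_equal_rename_makes_4 : Prop := ∀ (s : String), Dom_rename_makes_4 s → Spec_rename_makes_4 s (rename_makes_4 s)

-- ===== LEMMAS AND PROOFS =====

-- flatten A's buckets into (misspelling, canonical) pairs in scan order
def pvFlatten (bs : List (String × List String)) : List (String × String) :=
  bs.flatMap (fun p => p.2.map (fun m => (m, p.1)))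

-- keep only the first pair for each key
def pvDedupGo (seen : List String) : List (String × String) → List (String × String)
  | [] => []
  | (k, v) :: t => if seen.contains k then pvDedupGo seen t else (k, v) :: pvDedupGo (k :: seen) t

theorem pvFind?_map_key (s c : String) (ms : List String) :
    List.find? (fun p => p.1 == s) (ms.map (fun m => (m, c)))
      = if ms.contains s then some (s, c) else none := by
  induction ms with
  | nil => rfl
  | cons m t ih =>
    simp only [List.map_cons, List.find?_cons, List.contains_cons]
    by_cases h : (m == s) = true
    · have : m = s := eq_of_beq h
      subst this
      simp
    · have hsm : ¬ s = m := fun he => h (by simp [he])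
      have h' : (m == s) = false := by simpa using h
      simp [h', ih, hsm]

theorem pvScanA_eq_find (s : String) (bs : List (String × List String)) :
    pvScanA s bs
      = (match List.find? (fun p => p.1 == s) (pvFlatten bs) with
         | some p => p.2
         | none => s) := by
  induction bs with
  | nil => rfl
  | cons p rest ih =>
    obtain ⟨c, ms⟩ := p
    rw [show pvFlatten ((c, ms) :: rest)
          = ms.map (fun m => (m, c)) ++ pvFlatten rest from rfl,
        List.find?_append, pvFind?_map_key]
    by_cases h : ms.contains s = true
    · have hm : s ∈ ms := by simpa using h
      simp [pvScanA, hm]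
    · simp only [pvScanA, h, Bool.false_eq_true, if_false, Option.none_or]
      exact ih

theorem pvFind?_dedupGo (s : String) (l : List (String × String)) (seen : List String) :
    List.find? (fun p => p.1 == s) (pvDedupGo seen l)
      = if seen.contains s then none else List.find? (fun p => p.1 == s) l := by
  induction l generalizing seen with
  | nil => simp [pvDedupGo]
  | cons p t ih =>
    obtain ⟨k, v⟩ := p
    simp only [pvDedupGo]
    by_cases hk : k ∈ seen
    · rw [if_pos (by simpa using hk), ih]
      by_cases hs : s ∈ seen
      · simp [hs]
      · have hne : (k == s) = false := beq_eq_false_iff_ne.mpr (fun he => hs (he ▸ hk))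
        simp [hs, hne]
    · rw [if_neg (by simpa using hk)]
      by_cases hks : k = s
      · subst hks
        simp [hk]
      · have hne : (k == s) = false := beq_eq_false_iff_ne.mpr hks
        have hsk : ¬ s = k := fun he => hks he.symm
        simp [ih, hne, hsk]

set_option maxRecDepth 100000 in
theorem pvCanonical_eq : pvCanonical = pvDedupGo [] (pvFlatten pvSpellings) := by rfl

-- ===== VERDICT (by name: the statement is the Claim_ definition above) =====
theorem rename_makes_4_spec : Claim_equal_rename_makes_4 := by
  intro s _
  unfold Spec_rename_makes_4 rename_makes_4 rename_makes_4_alt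
  rw [pvCanonical_eq, pvFind?_dedupGo, pvScanA_eq_find]
  simp
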